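-- pv_equiv track=rewrite | github.com/SimonHeggie/Blender-Spine-IO | Output/SPINE_Output_meshutils.py | _map_src_edge_to_new
-- ===== SOURCE A (Python) =====
-- def _map_src_edge_to_new(src_edge, new_to_src):
--     """Map a Blender edge (src vertex indices) to the FIRST matching NEW indices.
--        Good for marked seams/sharp; UV-split duplicates may map to first occurrence."""
--     src_i, src_j = int(src_edge[0]), int(src_edge[1])
--     first_i = None; first_j = None
--     for new_idx, (svi, _loopi) in enumerate(new_to_src):
--         if first_i is None and int(svi) == src_i:
--             first_i = new_idx
--             if first_j is not None: break
--         if first_j is None and int(svi) == src_j: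
--             first_j = new_idx
--             if first_i is not None: break
--     if first_i is None or first_j is None or first_i == first_j:
--         return None
--     return (first_i, first_j) if first_i < first_j else (first_j, first_i)
-- ===== SOURCE B (Python) =====
-- def _map_src_edge_to_new(src_edge, new_to_src):
--     """Map a Blender edge (src vertex indices) to the FIRST matching NEW indices.
--        Declarative form: the earliest match is the MINIMUM over all matching indices."""
--     si, sj = int(src_edge[0]), int(src_edge[1])
--     i = min((k for k, (v, _loopi) in enumerate(new_to_src) if int(v) == si), default=None)
--     j = min((k for k, (v, _loopi) in enumerate(new_to_src) if int(v) == sj), default=None)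
--     if i is None or j is None or i == j:
--         return None
--     return (min(i, j), max(i, j))
-- ===== Notes on version B (the rewrite author's own statement) =====
-- stated objective: simpler
-- what changed: Replaces A's single interleaved early-exit scan with two optional accumulators and break statements by a declarative formulation: each endpoint's earliest new index is the minimum over all matching indices (min over a filtered enumerate), followed by the same guard and a min/max pair.
import Mathlib
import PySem

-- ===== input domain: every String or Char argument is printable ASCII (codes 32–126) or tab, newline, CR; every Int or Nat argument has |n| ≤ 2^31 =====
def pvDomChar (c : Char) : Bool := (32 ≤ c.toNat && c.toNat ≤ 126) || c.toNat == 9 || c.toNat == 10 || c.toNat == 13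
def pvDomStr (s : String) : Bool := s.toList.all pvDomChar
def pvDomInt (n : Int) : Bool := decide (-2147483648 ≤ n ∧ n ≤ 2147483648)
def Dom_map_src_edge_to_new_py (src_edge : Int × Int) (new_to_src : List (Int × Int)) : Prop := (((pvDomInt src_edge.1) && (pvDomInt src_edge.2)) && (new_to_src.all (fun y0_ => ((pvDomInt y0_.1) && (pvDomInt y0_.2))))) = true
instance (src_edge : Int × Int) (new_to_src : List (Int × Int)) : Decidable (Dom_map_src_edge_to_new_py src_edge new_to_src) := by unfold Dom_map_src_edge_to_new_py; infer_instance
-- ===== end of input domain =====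

-- B replaces A's interleaved two-accumulator early-exit scan by a declarative form:
-- each endpoint's earliest new index is the minimum over all matching indices (objective: simpler).

-- ===== PORT A =====
-- the for-loop over enumerate(new_to_src) with accumulators first_i, first_j and breaks
def pvLoopA (si sj : Int) : List (Int × Int) → Int → Option Int → Option Int → Option Int × Option Int
  | [], _, fi, fj => (fi, fj)
  | (svi, _) :: rest, idx, fi, fj =>
    if fi = none ∧ svi = si then
      -- first_i = new_idx; if first_j is not None: break
      if fj ≠ none then (some idx, fj)
      else
        -- fall through to the second if with first_i = some idx
        if svi = sj then (some idx, some idx)  -- first_j = new_idx; first_i is not None: break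
        else pvLoopA si sj rest (idx + 1) (some idx) fj
    else
      if fj = none ∧ svi = sj then
        -- first_j = new_idx; if first_i is not None: break
        if fi ≠ none then (fi, some idx)
        else pvLoopA si sj rest (idx + 1) fi (some idx)
      else pvLoopA si sj rest (idx + 1) fi fj

def map_src_edge_to_new_py (src_edge : Int × Int) (new_to_src : List (Int × Int)) : Option (Int × Int) :=
  let si := src_edge.1
  let sj := src_edge.2
  match pvLoopA si sj new_to_src 0 none none with
  | (some a, some b) =>
      if a = b then none
      else if a < b then some (a, b) else some (b, a)
  | _ => none

-- ===== PORT B =====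
-- the generator '(k for k, (v, _) in enumerate(new_to_src) if int(v) == s)': all matching indices
def pvIdxList (s : Int) : List (Int × Int) → Int → List Int
  | [], _ => []
  | (v, _) :: rest, k => if v = s then k :: pvIdxList s rest (k + 1) else pvIdxList s rest (k + 1)

def map_src_edge_to_new_py_alt (src_edge : Int × Int) (new_to_src : List (Int × Int)) : Option (Int × Int) :=
  -- i = min(matching indices, default=None); likewise j; then the guard
  match PySem.List.min? (pvIdxList src_edge.1 new_to_src 0) (fun x => x) with
  | none => none
  | some i =>
    match PySem.List.min? (pvIdxList src_edge.2 new_to_src 0) (fun x => x) with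
    | none => none
    | some j => if i = j then none else some (min i j, max i j)

-- ===== PRECONDITION & SPEC =====
def Spec_map_src_edge_to_new_py (src_edge : Int × Int) (new_to_src : List (Int × Int)) (out : Option (Int × Int)) : Prop := out = map_src_edge_to_new_py_alt src_edge new_to_src
instance (src_edge : Int × Int) (new_to_src : List (Int × Int)) (out : Option (Int × Int)) : Decidable (Spec_map_src_edge_to_new_py src_edge new_to_src out) := by unfold Spec_map_src_edge_to_new_py; infer_instance

-- ===== CLAIM (what is proved, stated in full; the proofs are below) =====
def Claim_equal_map_src_edge_to_new_py : Prop := ∀ (src_edge : Int × Int) (new_to_src : List (Int × Int)), Dom_map_src_edge_to_new_py src_edge new_to_src → Spec_map_src_edge_to_new_py src_edge new_to_src (map_src_edge_to_new_py src_edge new_to_src)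

-- ===== LEMMAS AND PROOFS =====

-- first occurrence of source vertex s in the tail starting at absolute index idx
def pvFirstIdx (s : Int) : List (Int × Int) → Int → Option Int
  | [], _ => none
  | (svi, _) :: rest, idx => if svi = s then some idx else pvFirstIdx s rest (idx + 1)

theorem pvLoopA_eq (si sj : Int) (l : List (Int × Int)) (idx : Int) (fi fj : Option Int) :
    pvLoopA si sj l idx fi fj =
      (fi.orElse (fun _ => pvFirstIdx si l idx), fj.orElse (fun _ => pvFirstIdx sj l idx)) := by
  induction l generalizing idx fi fj with
  | nil => cases fi <;> cases fj <;> simp [pvLoopA, pvFirstIdx]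
  | cons hd tl ih =>
    obtain ⟨svi, loopi⟩ := hd
    cases fi <;> cases fj <;>
      simp only [pvLoopA, pvFirstIdx] <;>
      split_ifs <;>
      simp_all [Option.orElse]

theorem pvIdxList_ge (s : Int) (l : List (Int × Int)) (k : Int) :
    ∀ x ∈ pvIdxList s l k, k ≤ x := by
  induction l generalizing k with
  | nil => simp [pvIdxList]
  | cons hd tl ih =>
    obtain ⟨v, _⟩ := hd
    intro x hx
    simp only [pvIdxList] at hx
    split_ifs at hx with hv
    · rcases List.mem_cons.mp hx with h | h
      · omega
      · have := ih (k + 1) x h; omega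
    · have := ih (k + 1) x hx; omega

theorem pvIdxList_min (s : Int) (l : List (Int × Int)) (idx : Int) :
    PySem.List.min? (pvIdxList s l idx) (fun x => x) = pvFirstIdx s l idx := by
  induction l generalizing idx with
  | nil => simp [pvIdxList, pvFirstIdx, PySem.List.min?]
  | cons hd tl ih =>
    obtain ⟨v, _⟩ := hd
    simp only [pvIdxList, pvFirstIdx]
    split_ifs with hv
    · -- head idx is ≤ every later matching index, so it is the minimum
      rcases hmin : PySem.List.min? (idx :: pvIdxList s tl (idx + 1)) (fun x => x) with _ | m
      · exact absurd hmin (by simp [PySem.List.min?_eq_none_iff])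
      · have hmem := PySem.List.min?_mem hmin
        have hle : m ≤ idx := PySem.List.min?_isMin hmin idx (by simp)
        have hge : idx ≤ m := by
          rcases List.mem_cons.mp hmem with h | h
          · omega
          · exact pvIdxList_ge s tl (idx + 1) m h |>.trans' (by omega)
        have : m = idx := le_antisymm hle hge
        simp [this]
    · exact ih (idx + 1)

-- ===== VERDICT (by name: the statement is the Claim_ definition above) =====
theorem map_src_edge_to_new_py_spec : Claim_equal_map_src_edge_to_new_py := by
  intro se l _
  unfold Spec_map_src_edge_to_new_py
  simp only [map_src_edge_to_new_py, map_src_edge_to_new_py_alt, pvLoopA_eq, pvIdxList_min,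
    Option.orElse]
  rcases h1 : pvFirstIdx se.1 l 0 with _ | a <;>
    rcases h2 : pvFirstIdx se.2 l 0 with _ | b <;> simp
  by_cases hab : a = b
  · simp [hab]
  · simp [hab]
    by_cases h : a < b
    · simp [h, le_of_lt h]
    · have hlt : b < a := lt_of_le_of_ne (not_lt.mp h) (Ne.symm hab)
      simp [h, le_of_lt hlt]
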